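-- pv_equiv track=rewrite | github.com/BNaz-OTU/code-sync | leetcode/maximum-count-of-positive-integer-and-negative-integer.py | positive
-- ===== SOURCE A (Python) =====
-- def positive(nums):
--     left = 0
--     right = len(nums) - 1
--     index = len(nums)
--
--     while left <= right:
--         middle = (left + right) // 2
--
--         if (nums[middle] <= 0):
--             left = middle + 1
--         else:
--             right = middle - 1
--             index = middle
--
--     return index
-- ===== SOURCE B (Python) =====
-- def positive(nums):
--     # Recurse on physical list segments: split at the pivot element and descend
--     # into an actual sublist, carrying only the segment's base offset; the found
--     # index bubbles up as None/int instead of a mutable best-index accumulator.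
--     def go(base, seg):
--         if not seg:
--             return None
--         k = (len(seg) - 1) // 2
--         if seg[k] <= 0:
--             return go(base + k + 1, seg[k + 1:])
--         r = go(base, seg[:k])
--         return base + k if r is None else r
--
--     r = go(0, nums)
--     return len(nums) if r is None else r
-- ===== Notes on version B (the rewrite author's own statement) =====
-- stated objective: alternative
-- what changed: A's iterative binary search over mutable index bounds (left/right/index) is recast as a recursion on physical list segments: the current sublist is split at its pivot element with slicing, only a base offset is carried, and the found index bubbles up as an Optional instead of a best-index accumulator.
import Mathlib
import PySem

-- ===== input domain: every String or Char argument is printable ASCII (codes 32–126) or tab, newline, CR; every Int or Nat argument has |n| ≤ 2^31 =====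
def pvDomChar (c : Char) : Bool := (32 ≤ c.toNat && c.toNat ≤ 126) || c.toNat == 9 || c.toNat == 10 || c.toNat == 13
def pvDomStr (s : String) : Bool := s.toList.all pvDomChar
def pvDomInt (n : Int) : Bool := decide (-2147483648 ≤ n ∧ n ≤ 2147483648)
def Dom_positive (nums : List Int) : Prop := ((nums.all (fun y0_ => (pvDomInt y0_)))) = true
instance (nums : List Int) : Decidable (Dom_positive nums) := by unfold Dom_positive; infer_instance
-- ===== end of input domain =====

-- B replaces A's index-bound binary search (mutable left/right/index) by a recursion on
-- physical list segments: split the sublist at its pivot element and descend into an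
-- actual slice, carrying only the segment's base offset; the found index bubbles up as
-- an Option instead of a best-index accumulator.

-- ===== PORT A =====
-- A's while loop: state (left, right, index), mutated in place.
-- nums[middle] is always in range when the loop body runs, so pyGetD is exact here.
def positiveLoop (nums : List Int) (left right index : Int) : Int :=
  if h : left ≤ right then
    let middle := PySem.Int.floordiv (left + right) 2
    if PySem.List.pyGetD nums middle 0 ≤ 0 then
      positiveLoop nums (middle + 1) right index
    else
      positiveLoop nums left (middle - 1) middle
  else index
termination_by (right + 1 - left).toNat
decreasing_by
  · have := PySem.Int.floordiv_two_mid_bounds h; omega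
  · have := PySem.Int.floordiv_two_mid_bounds h; omega

def positive (nums : List Int) : Int :=
  positiveLoop nums 0 ((nums.length : Int) - 1) (nums.length : Int)

-- ===== PORT B =====
-- B's helper go(base, seg): k and the slice bounds are nonnegative and in range, so
-- seg[k] = seg.getD k 0, seg[k+1:] = seg.drop (k+1) and seg[:k] = seg.take k exactly.
def posSeg (base : Int) (seg : List Int) : Option Int :=
  if hseg : seg.isEmpty then none
  else
    let k := (seg.length - 1) / 2
    if seg.getD k 0 ≤ 0 then
      posSeg (base + (k : Int) + 1) (seg.drop (k + 1))
    else
      match posSeg base (seg.take k) with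
      | none => some (base + (k : Int))
      | some r => some r
termination_by seg.length
decreasing_by
  · simp only [List.isEmpty_iff_length_eq_zero] at hseg
    simp only [List.length_drop]; omega
  · simp only [List.isEmpty_iff_length_eq_zero] at hseg
    simp only [List.length_take]; omega

def positive_alt (nums : List Int) : Int :=
  (posSeg 0 nums).getD (nums.length : Int)

-- ===== PRECONDITION & SPEC =====
def Spec_positive (nums : List Int) (out : Int) : Prop := out = positive_alt nums
instance (nums : List Int) (out : Int) : Decidable (Spec_positive nums out) := by unfold Spec_positive; infer_instance

-- ===== CLAIM (what is proved, stated in full; the proofs are below) =====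
def Claim_equal_positive : Prop := ∀ (nums : List Int), Dom_positive nums → Spec_positive nums (positive nums)

-- ===== LEMMAS AND PROOFS =====
-- The index-bound loop equals the segment recursion on the corresponding slice:
-- the segment standing for bounds (left, right) is (nums.drop left).take (right+1-left),
-- and A's accumulator `index` is B's Option default.
theorem positiveLoop_eq_posSeg (nums : List Int) :
    ∀ (n : Nat) (left right index : Int), (right + 1 - left).toNat = n →
      0 ≤ left → right < (nums.length : Int) →
      positiveLoop nums left right index =
        (posSeg left ((nums.drop left.toNat).take (right + 1 - left).toNat)).getD index := by
  intro n
  induction n using Nat.strong_induction_on with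
  | _ n ih =>
    intro left right index hn hl hr
    by_cases h : left ≤ right
    · have hm1 : 1 ≤ (right + 1 - left).toNat := by omega
      have hlen : ((nums.drop left.toNat).take (right + 1 - left).toNat).length
          = (right + 1 - left).toNat := by
        simp only [List.length_take, List.length_drop]; omega
      have hne : ¬ (((nums.drop left.toNat).take (right + 1 - left).toNat).isEmpty = true) := by
        simp only [List.isEmpty_iff_length_eq_zero, hlen]; omega
      have hkm : ((right + 1 - left).toNat - 1) / 2 < (right + 1 - left).toNat := by omega
      have hmid : PySem.Int.floordiv (left + right) 2
          = left + ((((right + 1 - left).toNat - 1) / 2 : Nat) : Int) := by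
        rw [PySem.Int.floordiv_eq_ediv_of_pos (by norm_num)]
        omega
      have hget : PySem.List.pyGetD nums
            (left + ((((right + 1 - left).toNat - 1) / 2 : Nat) : Int)) 0
          = ((nums.drop left.toNat).take (right + 1 - left).toNat).getD
              (((right + 1 - left).toNat - 1) / 2) 0 := by
        have h1 : left + ((((right + 1 - left).toNat - 1) / 2 : Nat) : Int)
            = ((left.toNat + ((right + 1 - left).toNat - 1) / 2 : Nat) : Int) := by omega
        rw [h1, PySem.List.pyGetD_natCast]
        simp [List.getD_eq_getElem?_getD, List.getElem?_drop, hkm]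
      rw [positiveLoop, dif_pos h]
      rw [posSeg, dif_neg hne]
      simp only [hlen, hmid, hget]
      split_ifs with hcond
      · have hdrop : ((nums.drop left.toNat).take (right + 1 - left).toNat).drop
              (((right + 1 - left).toNat - 1) / 2 + 1)
            = (nums.drop (left + ((((right + 1 - left).toNat - 1) / 2 : Nat) : Int) + 1).toNat).take
                (right + 1 - (left + ((((right + 1 - left).toNat - 1) / 2 : Nat) : Int) + 1)).toNat := by
          have e1 : (right + 1 - left).toNat - (((right + 1 - left).toNat - 1) / 2 + 1)
              = (right + 1 - (left + ((((right + 1 - left).toNat - 1) / 2 : Nat) : Int) + 1)).toNat := by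
            omega
          have e2 : left.toNat + (((right + 1 - left).toNat - 1) / 2 + 1)
              = (left + ((((right + 1 - left).toNat - 1) / 2 : Nat) : Int) + 1).toNat := by
            omega
          rw [List.drop_take, List.drop_drop, e1, e2]
        rw [hdrop]
        exact ih _ (by omega) _ _ _ rfl (by omega) hr
      · have htake : ((nums.drop left.toNat).take (right + 1 - left).toNat).take
              (((right + 1 - left).toNat - 1) / 2)
            = (nums.drop left.toNat).take
                ((left + ((((right + 1 - left).toNat - 1) / 2 : Nat) : Int) - 1) + 1 - left).toNat := by
          have e3 : min (((right + 1 - left).toNat - 1) / 2) ((right + 1 - left).toNat)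
              = ((left + ((((right + 1 - left).toNat - 1) / 2 : Nat) : Int) - 1) + 1 - left).toNat := by
            omega
          rw [List.take_take, e3]
        have hrec := ih ((left + ((((right + 1 - left).toNat - 1) / 2 : Nat) : Int) - 1) + 1 - left).toNat
          (by omega) left (left + ((((right + 1 - left).toNat - 1) / 2 : Nat) : Int) - 1)
          (left + ((((right + 1 - left).toNat - 1) / 2 : Nat) : Int)) rfl hl (by omega)
        rw [hrec, ← htake]
        cases posSeg left (((nums.drop left.toNat).take (right + 1 - left).toNat).take
            (((right + 1 - left).toNat - 1) / 2)) with
        | none => simp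
        | some r => simp
    · rw [positiveLoop, dif_neg h]
      have hm : (right + 1 - left).toNat = 0 := by omega
      rw [hm]
      simp [posSeg]

-- ===== VERDICT (by name: the statement is the Claim_ definition above) =====
theorem positive_spec : Claim_equal_positive := by
  intro nums _
  unfold Spec_positive positive positive_alt
  have := positiveLoop_eq_posSeg nums ((nums.length : Int) - 1 + 1 - 0).toNat 0
    ((nums.length : Int) - 1) (nums.length : Int) rfl (by omega) (by omega)
  simpa using this
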